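-- pv_equiv track=rewrite | github.com/fullbat/OCR_text_detection | detect_translate_overwrite_text.py | concatenate_text_blocks
-- ===== SOURCE A (Python) =====
-- def concatenate_text_blocks(text_blocks):
--     # Sort the text blocks from top to bottom
--     text_blocks = sorted(text_blocks, key=lambda x: x[1][0][1], reverse=True)
--     # Concatenate the text blocks of the same line
--     text_blocks_concatenated = []
--     for text, vertices in text_blocks:
--         if len(text_blocks_concatenated) == 0:
--             text_blocks_concatenated.append((text, vertices))
--         else:
--             if vertices[0][1] - text_blocks_concatenated[-1][1][0][1] < 50:
--                 text_blocks_concatenated[-1] = (text_blocks_concatenated[-1][0] + ' ' + text, text_blocks_concatenated[-1][1])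
--             else:
--                 text_blocks_concatenated.append((text, vertices))
--     return text_blocks_concatenated
-- ===== SOURCE B (Python) =====
-- def concatenate_text_blocks(text_blocks):
--     # Same sort as A; since the order is descending by y, A's 50-pixel gap test
--     # (current_y - anchor_y < 50) is always true, so A merges every block into one.
--     # B computes that single merged block directly: join all texts, keep the
--     # top block's vertices.
--     if not text_blocks:
--         return []
--     ordered = sorted(text_blocks, key=lambda x: x[1][0][1], reverse=True)
--     return [(' '.join(text for text, _ in ordered), ordered[0][1])]
-- ===== Notes on version B (the rewrite author's own statement) =====
-- stated objective: simpler
-- what changed: A's threshold loop with repeated last-element rewriting is replaced by a closed form: after the same descending sort the gap test 'y - anchor_y < 50' always holds, so the result is exactly one block whose text is ' '.join of all texts and whose vertices are the first sorted block's; the fold and repeated string concatenation disappear.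
-- outside the precondition, e.g. on concatenate_text_blocks([('a', [])]): A raises IndexError, B raises IndexError; on concatenate_text_blocks([('a', [[5]])]): A raises IndexError, B raises IndexError
import Mathlib
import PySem

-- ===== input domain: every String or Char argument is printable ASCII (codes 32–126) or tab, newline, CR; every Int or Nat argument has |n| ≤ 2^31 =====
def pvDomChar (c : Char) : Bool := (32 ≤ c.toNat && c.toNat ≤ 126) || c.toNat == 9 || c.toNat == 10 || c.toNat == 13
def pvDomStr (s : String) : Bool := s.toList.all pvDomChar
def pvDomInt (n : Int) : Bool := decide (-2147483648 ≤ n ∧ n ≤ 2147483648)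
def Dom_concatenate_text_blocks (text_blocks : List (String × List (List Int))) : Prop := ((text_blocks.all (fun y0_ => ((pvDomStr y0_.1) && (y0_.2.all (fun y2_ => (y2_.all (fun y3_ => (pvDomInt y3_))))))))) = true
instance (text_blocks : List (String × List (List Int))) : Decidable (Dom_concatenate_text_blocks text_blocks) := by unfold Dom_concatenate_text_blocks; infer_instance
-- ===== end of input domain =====

-- B replaces A's threshold loop by the closed form it computes (after the descending
-- sort the gap test 'y - anchor_y < 50' always holds, so A merges everything into one
-- block); objective: simpler.

-- shared sort key: the Python lambda `x[1][0][1]` of both programs.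
-- Exact on Pre_ (vertices nonempty, first vertex has ≥ 2 entries); outside Pre_ the
-- Python raises IndexError and those inputs are excluded.
def pvKey (v : List (List Int)) : Int :=
  PySem.List.pyGetD (PySem.List.pyGetD v 0 []) 1 0

-- ===== PORT A =====
def concatenate_text_blocks (text_blocks : List (String × List (List Int))) : List (String × List (List Int)) :=
  -- text_blocks = sorted(text_blocks, key=lambda x: x[1][0][1], reverse=True)
  let tb := PySem.List.sorted text_blocks (fun x => pvKey x.2) true
  -- for text, vertices in tb: … (appending / rewriting the last element)
  tb.foldl (fun acc b =>
    match acc.getLast? with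
    | none => acc ++ [b]                       -- len(result) == 0
    | some last =>
      if pvKey b.2 - pvKey last.2 < 50 then    -- vertices[0][1] - result[-1][1][0][1] < 50
        acc.dropLast ++ [(last.1 ++ " " ++ b.1, last.2)]
      else
        acc ++ [b]) []

-- ===== PORT B =====
def concatenate_text_blocks_alt (text_blocks : List (String × List (List Int))) : List (String × List (List Int)) :=
  -- if not text_blocks: return []  /  ordered = sorted(...)  /  single joined block
  match PySem.List.sorted text_blocks (fun x => pvKey x.2) true with
  | [] => []
  | m :: t => [(PySem.Str.join " " ((m :: t).map Prod.fst), m.2)]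

-- ===== PRECONDITION & SPEC =====
-- Pre_ excludes exactly the inputs where the key lambda x[1][0][1] raises IndexError
-- in both programs: some block has an empty vertex list or a first vertex of length < 2.
def Pre_concatenate_text_blocks (text_blocks : List (String × List (List Int))) : Prop :=
  ∀ b ∈ text_blocks, b.2 ≠ [] ∧ 2 ≤ (b.2.headD []).length
instance (text_blocks : List (String × List (List Int))) : Decidable (Pre_concatenate_text_blocks text_blocks) := by unfold Pre_concatenate_text_blocks; infer_instance

def pvWitness_concatenate_text_blocks : (List (String × List (List Int))) :=
  [("hi", [[0, 10], [5, 10]]), ("lo", [[0, 200]])]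

def Spec_concatenate_text_blocks (text_blocks : List (String × List (List Int))) (out : List (String × List (List Int))) : Prop := out = concatenate_text_blocks_alt text_blocks
instance (text_blocks : List (String × List (List Int))) (out : List (String × List (List Int))) : Decidable (Spec_concatenate_text_blocks text_blocks out) := by unfold Spec_concatenate_text_blocks; infer_instance

-- ===== CLAIM (what is proved, stated in full; the proofs are below) =====
def Claim_equal_concatenate_text_blocks : Prop := ∀ (text_blocks : List (String × List (List Int))), Dom_concatenate_text_blocks text_blocks → Pre_concatenate_text_blocks text_blocks → Spec_concatenate_text_blocks text_blocks (concatenate_text_blocks text_blocks)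

-- ===== LEMMAS AND PROOFS =====

-- ' '.join as a left fold of `… ++ " " ++ …`, the shape A's merge branch produces.
theorem pv_join_cons (a b : String) (l : List String) :
    PySem.Str.join " " (a :: b :: l) = a ++ " " ++ PySem.Str.join " " (b :: l) := by
  simp [PySem.Str.join, PySem.Chars.join_cons_cons]
  rw [show (' ' :: PySem.Chars.join [' '] (b.toList :: List.map String.toList l))
        = [' '] ++ PySem.Chars.join [' '] (b.toList :: List.map String.toList l) from rfl,
     String.ofList_append, ← String.append_assoc]

-- prepending 'a ++ " "' to the head of a nonempty join pulls out of the join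
theorem pv_join_absorb (a b : String) (l : List String) :
    PySem.Str.join " " ((a ++ " " ++ b) :: l) = a ++ " " ++ PySem.Str.join " " (b :: l) := by
  cases l with
  | nil =>
    simp [PySem.Str.join, PySem.Chars.join_singleton]
    rw [show (' ' :: b.toList) = [' '] ++ b.toList from rfl, String.ofList_append,
      ← String.append_assoc]
    simp
  | cons c l =>
    rw [pv_join_cons, pv_join_cons]
    simp [String.append_assoc]

theorem pv_foldl_join (t : List (String × List (List Int))) (a : String) :
    t.foldl (fun s b => s ++ " " ++ b.1) a = PySem.Str.join " " (a :: t.map Prod.fst) := by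
  induction t generalizing a with
  | nil => simp [PySem.Str.join, PySem.Chars.join_singleton]
  | cons x t ih => rw [List.foldl_cons, ih, List.map_cons, pv_join_absorb, pv_join_cons]

-- A's fold invariant: once the accumulator holds a single block whose anchor y
-- dominates every remaining block's y, every step takes the merge branch.
theorem pv_fold_merge (t : List (String × List (List Int))) (s : String) (v : List (List Int))
    (h : ∀ b ∈ t, pvKey b.2 ≤ pvKey v) :
    t.foldl (fun acc b =>
      match acc.getLast? with
      | none => acc ++ [b]
      | some last =>
        if pvKey b.2 - pvKey last.2 < 50 then
          acc.dropLast ++ [(last.1 ++ " " ++ b.1, last.2)]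
        else
          acc ++ [b]) [(s, v)]
    = [(t.foldl (fun x b => x ++ " " ++ b.1) s, v)] := by
  induction t generalizing s with
  | nil => rfl
  | cons x t ih =>
    have hx : pvKey x.2 ≤ pvKey v := h x (List.mem_cons_self ..)
    simp only [List.foldl_cons, List.getLast?_singleton, List.dropLast,
      List.nil_append, if_pos (by omega : pvKey x.2 - pvKey v < 50)]
    exact ih _ (fun b hb => h b (List.mem_cons_of_mem _ hb))

-- ===== VERDICT (by name: the statement is the Claim_ definition above) =====
theorem concatenate_text_blocks_spec : Claim_equal_concatenate_text_blocks := by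
  intro tb _ _
  unfold Spec_concatenate_text_blocks concatenate_text_blocks concatenate_text_blocks_alt
  cases hs : PySem.List.sorted tb (fun x => pvKey x.2) true with
  | nil => rfl
  | cons m t =>
    have hdom : ∀ b ∈ t, pvKey b.2 ≤ pvKey m.2 := by
      intro b hb
      exact PySem.List.key_head_sorted_rev_ge (xs := tb) (key := fun x => pvKey x.2) hs b
        ((PySem.List.mem_sorted tb (fun x => pvKey x.2) true b).mp
          (by rw [hs]; exact List.mem_cons_of_mem _ hb))
    simp only [List.foldl_cons, List.getLast?_nil, List.nil_append]
    rw [pv_fold_merge t m.1 m.2 hdom, pv_foldl_join, List.map_cons]
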